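-- pv_equiv track=rewrite | github.com/PLATOONProject/E-Falcon | API/main.py | get_question_combinatios
-- ===== SOURCE A (Python) =====
-- def get_question_combinatios(question,questionStopWords):
--     combinations=[]
--     tempCombination=""
--     if len(questionStopWords)==0:
--         combinations = question.split(' ')
--     else:
--         for word in question.split(' '):
--             if word in questionStopWords:
--                 if tempCombination != "":
--                     combinations.append(tempCombination.strip())
--                     tempCombination=""
--             else:
--                 tempCombination=tempCombination+word+" "
--         if tempCombination != "":
--               combinations.append(tempCombination.strip())
--     return combinations
-- ===== SOURCE B (Python) =====
-- def get_question_combinatios(question, questionStopWords):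
--     words = question.split(' ')
--     if len(questionStopWords) == 0:
--         return words
--     combinations = []
--     i, n = 0, len(words)
--     while i < n:
--         if words[i] in questionStopWords:
--             i += 1
--             continue
--         j = i
--         while j < n and words[j] not in questionStopWords:
--             j += 1
--         combinations.append(" ".join(words[i:j]).strip())
--         i = j
--     return combinations
-- ===== Notes on version B (the rewrite author's own statement) =====
-- stated objective: alternative
-- what changed: Replaces the flag-and-accumulator string building (append word+' ' to a temp, flush on stop word) with a two-pointer run scan that slices each maximal run of non-stop words and joins it once.
import Mathlib
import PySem

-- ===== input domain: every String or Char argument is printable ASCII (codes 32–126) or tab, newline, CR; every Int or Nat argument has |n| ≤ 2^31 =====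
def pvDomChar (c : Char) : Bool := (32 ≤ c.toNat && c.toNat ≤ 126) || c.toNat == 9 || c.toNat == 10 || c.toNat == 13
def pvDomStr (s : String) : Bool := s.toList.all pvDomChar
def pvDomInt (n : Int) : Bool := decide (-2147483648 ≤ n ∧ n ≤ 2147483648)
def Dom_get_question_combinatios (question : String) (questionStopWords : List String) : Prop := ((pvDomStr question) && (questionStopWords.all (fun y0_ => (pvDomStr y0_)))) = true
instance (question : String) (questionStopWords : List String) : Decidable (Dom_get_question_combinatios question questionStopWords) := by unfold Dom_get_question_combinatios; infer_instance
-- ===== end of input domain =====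

-- B replaces A's flag-and-accumulator string building with a two-pointer scan over maximal
-- runs of non-stop words, joined once per run (objective: alternative decomposition, same cost).

-- ===== PORT A =====
-- the for-loop of A over the split words, state = (combinations, tempCombination); strings as List Char
def pvALoop (stop : List (List Char)) : List (List Char) → List (List Char) → List Char → List (List Char)
  | [], combs, temp => if temp ≠ [] then combs ++ [PySem.Chars.strip temp] else combs
  | w :: ws, combs, temp =>
    if stop.contains w then
      if temp ≠ [] then pvALoop stop ws (combs ++ [PySem.Chars.strip temp]) [] else pvALoop stop ws combs temp
    else pvALoop stop ws combs (temp ++ w ++ [' '])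

def get_question_combinatios (question : String) (questionStopWords : List String) : List String :=
  if questionStopWords.length == 0 then
    (PySem.Chars.splitOn question.toList [' ']).map String.mk
  else
    (pvALoop (questionStopWords.map String.toList)
      (PySem.Chars.splitOn question.toList [' ']) [] []).map String.mk

-- ===== PORT B =====
-- B's outer while-loop: skip a stop word, or slice off the maximal run of non-stop words
def pvBLoop (stop : List (List Char)) : List (List Char) → List (List Char)
  | [] => []
  | w :: ws =>
    if stop.contains w then pvBLoop stop ws
    else
      PySem.Chars.strip (PySem.Chars.join [' '] (w :: ws.takeWhile (fun x => !stop.contains x)))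
        :: pvBLoop stop (ws.dropWhile (fun x => !stop.contains x))
  termination_by ws => ws.length
  decreasing_by
    · simp
    · simpa using Nat.lt_succ_of_le (List.length_dropWhile_le _ ws)

def get_question_combinatios_alt (question : String) (questionStopWords : List String) : List String :=
  let words := PySem.Chars.splitOn question.toList [' ']
  if questionStopWords.length == 0 then words.map String.mk
  else (pvBLoop (questionStopWords.map String.toList) words).map String.mk

-- ===== PRECONDITION & SPEC =====
def Spec_get_question_combinatios (question : String) (questionStopWords : List String) (out : List String) : Prop := out = get_question_combinatios_alt question questionStopWords
instance (question : String) (questionStopWords : List String) (out : List String) : Decidable (Spec_get_question_combinatios question questionStopWords out) := by unfold Spec_get_question_combinatios; infer_instance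

-- ===== CLAIM (what is proved, stated in full; the proofs are below) =====
def Claim_equal_get_question_combinatios : Prop := ∀ (question : String) (questionStopWords : List String), Dom_get_question_combinatios question questionStopWords → Spec_get_question_combinatios question questionStopWords (get_question_combinatios question questionStopWords)

-- ===== LEMMAS AND PROOFS =====

-- the accumulated phrase of a pending run r, exactly as A builds it
def pvFlat (r : List (List Char)) : List Char := (r.map (· ++ [' '])).flatten

theorem pvFlat_append (r : List (List Char)) (w : List Char) :
    pvFlat (r ++ [w]) = pvFlat r ++ w ++ [' '] := by
  simp [pvFlat]

theorem pvFlat_eq_nil_iff (r : List (List Char)) : pvFlat r = [] ↔ r = [] := by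
  cases r with
  | nil => simp [pvFlat]
  | cons a r => simp [pvFlat]

theorem pvFlat_eq_join (r : List (List Char)) (h : r ≠ []) :
    pvFlat r = PySem.Chars.join [' '] r ++ [' '] := by
  induction r with
  | nil => simp at h
  | cons a r ih =>
    cases r with
    | nil => simp [pvFlat, PySem.Chars.join_singleton]
    | cons b r =>
      have hr := ih (by simp)
      simp only [pvFlat, List.map_cons, List.flatten_cons] at hr ⊢
      rw [hr, PySem.Chars.join_cons_cons]
      simp

theorem strip_append_space (x : List Char) :
    PySem.Chars.strip (x ++ [' ']) = PySem.Chars.strip x := by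
  have hsp : PySem.Chars.isspace ' ' = true := by decide
  simp only [PySem.Chars.strip, PySem.Chars.rstrip, PySem.Chars.lstrip]
  cases h : List.dropWhile PySem.Chars.isspace x <;>
    simp [List.dropWhile_append, List.dropWhile, hsp, h]

theorem strip_pvFlat (r : List (List Char)) (h : r ≠ []) :
    PySem.Chars.strip (pvFlat r) = PySem.Chars.strip (PySem.Chars.join [' '] r) := by
  rw [pvFlat_eq_join r h, strip_append_space]

-- pulling the accumulator out of A's loop
theorem pvALoop_acc (stop : List (List Char)) (ws : List (List Char)) :
    ∀ combs temp, pvALoop stop ws combs temp = combs ++ pvALoop stop ws [] temp := by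
  induction ws with
  | nil =>
    intro combs temp
    by_cases ht : temp = [] <;> simp [pvALoop, ht]
  | cons w ws ih =>
    intro combs temp
    simp only [pvALoop]
    by_cases hs : stop.contains w = true
    · rw [if_pos hs, if_pos hs]
      by_cases ht : temp = []
      · rw [if_neg (fun hne => hne ht), if_neg (fun hne => hne ht)]
        exact ih combs temp
      · rw [if_pos ht, if_pos ht, ih (combs ++ _), ih ([] ++ _)]
        simp
    · rw [if_neg hs, if_neg hs]
      exact ih combs _

-- the main invariant: A's loop, with the pending run r already accumulated, computes B's run-scan
theorem pvALoop_eq (stop : List (List Char)) (ws : List (List Char)) :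
    ∀ r, pvALoop stop ws [] (pvFlat r) =
      if r = [] then pvBLoop stop ws
      else PySem.Chars.strip (PySem.Chars.join [' '] (r ++ ws.takeWhile (fun x => !stop.contains x)))
            :: pvBLoop stop (ws.dropWhile (fun x => !stop.contains x)) := by
  induction ws with
  | nil =>
    intro r
    by_cases h : r = []
    · simp [h, pvALoop, pvFlat, pvBLoop]
    · have hne : pvFlat r ≠ [] := fun hx => h ((pvFlat_eq_nil_iff r).mp hx)
      simp only [pvALoop, pvBLoop]
      rw [if_pos hne, if_neg h, List.takeWhile_nil, List.dropWhile_nil, List.append_nil,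
        strip_pvFlat r h]
      simp only [pvBLoop, List.nil_append]
  | cons w ws ih =>
    intro r
    simp only [pvALoop]
    by_cases hs : stop.contains w = true
    · rw [if_pos hs]
      have htk : List.takeWhile (fun x => !stop.contains x) (w :: ws) = [] :=
        List.takeWhile_cons_of_neg (by simp only [hs, Bool.not_true]; exact Bool.false_ne_true)
      have hdr : List.dropWhile (fun x => !stop.contains x) (w :: ws) = w :: ws :=
        List.dropWhile_cons_of_neg (by simp only [hs, Bool.not_true]; exact Bool.false_ne_true)
      have hB : pvBLoop stop (w :: ws) = pvBLoop stop ws := by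
        simp only [pvBLoop]; rw [if_pos hs]
      have h0 : pvALoop stop ws [] [] = pvBLoop stop ws := by
        have hh := ih []
        rw [if_pos rfl] at hh
        exact hh
      by_cases h : r = []
      · subst h
        rw [if_neg (fun hne => hne rfl), if_pos rfl, hB]
        exact h0
      · have hne : pvFlat r ≠ [] := fun hx => h ((pvFlat_eq_nil_iff r).mp hx)
        rw [if_pos hne, if_neg h, htk, hdr, hB, List.append_nil, pvALoop_acc, h0,
          strip_pvFlat r h]
        simp
    · have hs' : stop.contains w = false := by
        revert hs; cases stop.contains w <;> simp
      rw [if_neg hs]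
      have h1 : pvFlat r ++ w ++ [' '] = pvFlat (r ++ [w]) := (pvFlat_append r w).symm
      rw [h1, ih (r ++ [w]), if_neg (by simp : ¬(r ++ [w] = []))]
      have htk : List.takeWhile (fun x => !stop.contains x) (w :: ws)
          = w :: List.takeWhile (fun x => !stop.contains x) ws :=
        List.takeWhile_cons_of_pos (by simp only [hs', Bool.not_false])
      have hdr : List.dropWhile (fun x => !stop.contains x) (w :: ws)
          = List.dropWhile (fun x => !stop.contains x) ws :=
        List.dropWhile_cons_of_pos (by simp only [hs', Bool.not_false])
      by_cases h : r = []
      · subst h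
        rw [if_pos rfl]
        simp only [pvBLoop]
        rw [if_neg hs]
        simp
      · rw [if_neg h, htk, hdr]
        simp

-- ===== VERDICT (by name: the statement is the Claim_ definition above) =====
theorem get_question_combinatios_spec : Claim_equal_get_question_combinatios := by
  intro question questionStopWords _
  unfold Spec_get_question_combinatios get_question_combinatios get_question_combinatios_alt
  by_cases h : questionStopWords.length == 0
  · simp [h]
  · simp only [h, Bool.false_eq_true, if_false]
    have hmain := pvALoop_eq (questionStopWords.map String.toList)
      (PySem.Chars.splitOn question.toList [' ']) []
    rw [if_pos rfl] at hmain
    have hnil : pvFlat [] = [] := rfl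
    rw [hnil] at hmain
    rw [hmain]
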